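-- pv_equiv track=rewrite | github.com/AlvaroBiano/AionUi | scripts/hermes-source/gateway/gateway_session_bridge_integration.py | _detect_active_task
-- ===== SOURCE A (Python) =====
-- def _detect_active_task(message_text: str, response: str) -> bool:
--     """Detecta se há uma tarefa activa na conversa."""
--     if not message_text and not response:
--         return False
--
--     # Check for task-related keywords
--     task_keywords = [
--         "task", "tarefa", "faça", "crie", "implemente", "build", "desenvolva",
--         "project", "projeto", "trabalho", "work", "help", "ajuda", "preciso",
--         "quero", "need", "want", "por favor", "please"
--     ]
--
--     text = (message_text + " " + response).lower()
--     return any(keyword in text for keyword in task_keywords)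
-- ===== SOURCE B (Python) =====
-- _TASK_KEYWORDS = (
--     "task", "tarefa", "faça", "crie", "implemente", "build", "desenvolva",
--     "project", "projeto", "trabalho", "work", "help", "ajuda", "preciso",
--     "quero", "need", "want", "por favor", "please",
-- )
--
-- # Index the keywords once by their first character, so the scan below only
-- # tests keywords that can possibly start at the current position.
-- _BY_FIRST = {}
-- for _k in _TASK_KEYWORDS:
--     _BY_FIRST.setdefault(_k[0], []).append(_k)
--
--
-- def _detect_active_task(message_text: str, response: str) -> bool:
--     # One left-to-right scan with first-character dispatch instead of one full
--     # substring search per keyword.  The empty-text guard is unnecessary: two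
--     # empty inputs give text == " ", which matches nothing.
--     text = (message_text + " " + response).lower()
--     for i, c in enumerate(text):
--         for k in _BY_FIRST.get(c, ()):
--             if text.startswith(k, i):
--                 return True
--     return False
-- ===== Notes on version B (the rewrite author's own statement) =====
-- stated objective: alternative
-- what changed: Replaces the per-keyword any()/substring-search loop (and the empty-text guard, which is redundant) by a single left-to-right scan of the combined text that, via a keyword index built once by first character, only tests keywords that can start at the current position.
import Mathlib
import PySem

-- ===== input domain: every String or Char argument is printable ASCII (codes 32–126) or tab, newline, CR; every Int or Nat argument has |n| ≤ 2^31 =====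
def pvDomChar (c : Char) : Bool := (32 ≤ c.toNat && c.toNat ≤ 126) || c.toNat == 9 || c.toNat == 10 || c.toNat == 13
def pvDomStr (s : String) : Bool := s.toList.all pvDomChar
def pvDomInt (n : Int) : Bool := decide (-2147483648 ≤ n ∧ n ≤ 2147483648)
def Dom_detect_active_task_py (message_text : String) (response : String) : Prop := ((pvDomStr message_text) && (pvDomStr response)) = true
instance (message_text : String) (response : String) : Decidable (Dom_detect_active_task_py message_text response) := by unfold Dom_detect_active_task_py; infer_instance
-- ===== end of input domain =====

-- B replaces A's per-keyword substring searches (and A's redundant empty-text guard) by one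
-- left-to-right scan of the combined text with a first-character keyword index (objective: alternative).

-- ===== PORT A =====
def detect_active_task_py (message_text : String) (response : String) : Bool :=
  if message_text.toList.isEmpty && response.toList.isEmpty then false
  else
    let task_keywords : List String :=
      ["task", "tarefa", "faça", "crie", "implemente", "build", "desenvolva",
       "project", "projeto", "trabalho", "work", "help", "ajuda", "preciso",
       "quero", "need", "want", "por favor", "please"]
    let text := PySem.Chars.lower (message_text.toList ++ [' '] ++ response.toList)
    task_keywords.any (fun keyword => PySem.Chars.isIn keyword.toList text)

-- ===== PORT B =====
def pvTaskKeywordsAlt : List String :=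
  ["task", "tarefa", "faça", "crie", "implemente", "build", "desenvolva",
   "project", "projeto", "trabalho", "work", "help", "ajuda", "preciso",
   "quero", "need", "want", "por favor", "please"]

-- Source B's '_BY_FIRST.setdefault(k[0], []).append(k)' loop: group the keywords by first
-- character (k[0] = headD, exact: every keyword is nonempty); setdefault-then-append is
-- Dict.modify with default [] appending the keyword.
def pvByFirst : PySem.Dict Char (List String) :=
  (pvTaskKeywordsAlt.map (fun k => (k.toList.headD ' ', k))).foldl
    (fun d p => PySem.Dict.modify d p.1 [] (· ++ [p.2])) PySem.Dict.empty

-- Source B's 'for i, c in enumerate(text)' loop: structural recursion over the suffixes of text;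
-- 'text.startswith(k, i)' is exactly a prefix test against the suffix starting at i.
def pvScanTails : List Char → Bool
  | [] => false
  | c :: rest =>
      ((PySem.Dict.getD pvByFirst c []).any
          (fun k => PySem.Chars.startswith (c :: rest) k.toList)) || pvScanTails rest

def detect_active_task_py_alt (message_text : String) (response : String) : Bool :=
  pvScanTails (PySem.Chars.lower (message_text.toList ++ [' '] ++ response.toList))

-- ===== PRECONDITION & SPEC =====
def Spec_detect_active_task_py (message_text : String) (response : String) (out : Bool) : Prop := out = detect_active_task_py_alt message_text response
instance (message_text : String) (response : String) (out : Bool) : Decidable (Spec_detect_active_task_py message_text response out) := by unfold Spec_detect_active_task_py; infer_instance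

-- ===== CLAIM (what is proved, stated in full; the proofs are below) =====
def Claim_equal_detect_active_task_py : Prop := ∀ (message_text : String) (response : String), Dom_detect_active_task_py message_text response → Spec_detect_active_task_py message_text response (detect_active_task_py message_text response)

-- ===== LEMMAS AND PROOFS =====

theorem pvKeywords_nonempty : ∀ k ∈ pvTaskKeywordsAlt, k.toList ≠ [] := by decide

-- the first-character index holds exactly the keywords starting with that character
theorem pvGetD_byFirst (c : Char) :
    PySem.Dict.getD pvByFirst c [] =
      pvTaskKeywordsAlt.filter (fun k => k.toList.headD ' ' == c) := by
  unfold pvByFirst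
  rw [PySem.Dict.getD_foldl_modify_append]
  simp [PySem.Dict.getD_empty, List.filter_map, Function.comp_def]

-- a keyword matching at a position must start with the character at that position,
-- so dispatching through the index loses no match
theorem pvDispatch (c : Char) (rest : List Char) :
    (PySem.Dict.getD pvByFirst c []).any
        (fun k => PySem.Chars.startswith (c :: rest) k.toList) =
      pvTaskKeywordsAlt.any (fun k => PySem.Chars.startswith (c :: rest) k.toList) := by
  rw [pvGetD_byFirst, Bool.eq_iff_iff]
  simp only [List.any_eq_true, List.mem_filter]
  constructor
  · rintro ⟨k, ⟨hk, _⟩, hsw⟩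
    exact ⟨k, hk, hsw⟩
  · rintro ⟨k, hk, hsw⟩
    refine ⟨k, ⟨hk, ?_⟩, hsw⟩
    have hpre := (PySem.Chars.startswith_iff _ _).1 hsw
    cases hkl : k.toList with
    | nil => exact absurd hkl (pvKeywords_nonempty k hk)
    | cons h t =>
        rw [hkl] at hpre
        obtain ⟨hh, -⟩ := List.cons_prefix_cons.1 hpre
        simp [hh]

theorem pvScanTails_iff (s : List Char) :
    pvScanTails s = true ↔ ∃ k ∈ pvTaskKeywordsAlt, ∃ i, k.toList <+: s.drop i := by
  induction s with
  | nil =>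
      simp only [pvScanTails, Bool.false_eq_true, false_iff]
      rintro ⟨k, hk, i, hpre⟩
      simp only [List.drop_nil, List.prefix_nil] at hpre
      exact pvKeywords_nonempty k hk hpre
  | cons c rest ih =>
      rw [pvScanTails, pvDispatch]
      simp only [Bool.or_eq_true, List.any_eq_true, PySem.Chars.startswith_iff, ih]
      constructor
      · rintro (⟨k, hk, hpre⟩ | ⟨k, hk, i, hpre⟩)
        · exact ⟨k, hk, 0, by simpa using hpre⟩
        · exact ⟨k, hk, i + 1, by simpa using hpre⟩
      · rintro ⟨k, hk, i, hpre⟩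
        cases i with
        | zero => exact Or.inl ⟨k, hk, by simpa using hpre⟩
        | succ j => exact Or.inr ⟨k, hk, j, by simpa using hpre⟩

theorem pvAny_eq_scan (text : List Char) :
    pvTaskKeywordsAlt.any (fun keyword => PySem.Chars.isIn keyword.toList text) =
      pvScanTails text := by
  rw [Bool.eq_iff_iff, pvScanTails_iff]
  simp only [List.any_eq_true]
  constructor
  · rintro ⟨k, hk, hin⟩
    obtain ⟨j, hpre⟩ := (PySem.Chars.exists_prefix_drop_iff_isIn _ _).2 hin
    exact ⟨k, hk, j, hpre⟩
  · rintro ⟨k, hk, i, hpre⟩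
    exact ⟨k, hk, (PySem.Chars.exists_prefix_drop_iff_isIn _ _).1 ⟨i, hpre⟩⟩

-- ===== VERDICT (by name: the statement is the Claim_ definition above) =====
theorem detect_active_task_py_spec : Claim_equal_detect_active_task_py := by
  intro m r _hdom
  unfold Spec_detect_active_task_py detect_active_task_py detect_active_task_py_alt
  by_cases hm : m.toList = []
  · by_cases hr : r.toList = []
    · simp only [hm, hr]
      decide
    · rw [if_neg (by simp [hm, hr])]
      exact pvAny_eq_scan _
  · rw [if_neg (by simp [hm])]
    exact pvAny_eq_scan _
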